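-- pv_equiv track=rewrite | github.com/MauriceGit/AdventOfCode | 2024/22.py | find_best_diff
-- ===== SOURCE A (Python) =====
-- def find_best_diff(all_diffs):
--     # lets assemble a set of ALL unique diffs to iterate over!
--     diffs = set()
--     for d in all_diffs:
--         diffs |= set(d.keys())
--
--     best_sum = 0
--     for d in diffs:
--         best_sum = max(sum(diff[d] for diff in all_diffs if d in diff), best_sum)
--     return best_sum
-- ===== SOURCE B (Python) =====
-- def find_best_diff(all_diffs):
--     # One pass: accumulate per-key totals, then take the running max (floored at 0).
--     totals = {}
--     for d in all_diffs:
--         for key, value in d.items():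
--             totals[key] = totals.get(key, 0) + value
--     best = 0
--     for s in totals.values():
--         if s > best:
--             best = s
--     return best
-- ===== Notes on version B (the rewrite author's own statement) =====
-- stated objective: faster
-- what changed: A collects the set of all keys and then, for each unique key, rescans every dict to sum its value; B makes a single pass over all dict entries accumulating per-key totals in one dictionary and then takes the running max of the totals (floored at A's initial 0).
import Mathlib
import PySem

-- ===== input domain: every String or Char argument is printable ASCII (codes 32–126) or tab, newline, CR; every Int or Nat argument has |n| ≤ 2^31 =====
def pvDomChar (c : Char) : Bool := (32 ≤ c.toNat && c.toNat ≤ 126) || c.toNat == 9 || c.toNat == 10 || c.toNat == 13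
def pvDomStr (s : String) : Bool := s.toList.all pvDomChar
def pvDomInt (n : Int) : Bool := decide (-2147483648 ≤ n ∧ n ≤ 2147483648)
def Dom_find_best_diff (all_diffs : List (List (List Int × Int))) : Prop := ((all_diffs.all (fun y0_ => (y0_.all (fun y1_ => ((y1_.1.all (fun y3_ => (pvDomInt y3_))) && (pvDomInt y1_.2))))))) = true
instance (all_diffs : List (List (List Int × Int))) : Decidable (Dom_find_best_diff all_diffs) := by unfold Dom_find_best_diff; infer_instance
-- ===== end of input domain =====

-- B replaces A's per-unique-key rescans of all dicts by one accumulating pass over the entries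
-- (objective: faster). The final value is a max, so A's set-iteration order cannot affect it.

-- ===== PORT A =====
-- 'diff[d]' is evaluated only for dicts with 'd in diff', so get? ... getD 0 is exact there.
def find_best_diff (all_diffs : List (List (List Int × Int))) : Int :=
  let diffs : PySem.Set (List Int) :=
    all_diffs.foldl
      (fun s d => PySem.Set.union s (PySem.Set.ofList (PySem.Dict.mk d).keys)) PySem.Set.empty
  diffs.foldl
    (fun best_sum d =>
      max (((all_diffs.filter (fun diff => (PySem.Dict.mk diff).contains d)).map
              (fun diff => (PySem.Dict.mk diff).getD d 0)).sum)
        best_sum) 0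

-- ===== PORT B =====
def find_best_diff_alt (all_diffs : List (List (List Int × Int))) : Int :=
  let totals : PySem.Dict (List Int) Int :=
    all_diffs.foldl
      (fun t d => d.foldl (fun t kv => t.insert kv.1 (t.getD kv.1 0 + kv.2)) t)
      PySem.Dict.empty
  totals.values.foldl (fun best s => if s > best then s else best) 0

-- ===== PRECONDITION & SPEC =====
-- Pre_ only requires each association list to have distinct keys, i.e. to actually represent a
-- Python dict (a dict[tuple,int] argument can never carry a duplicate key).
def Pre_find_best_diff (all_diffs : List (List (List Int × Int))) : Prop :=
  ∀ d ∈ all_diffs, (d.map Prod.fst).Nodup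
instance (all_diffs : List (List (List Int × Int))) : Decidable (Pre_find_best_diff all_diffs) := by
  unfold Pre_find_best_diff; infer_instance

def pvWitness_find_best_diff : (List (List (List Int × Int))) :=
  [[([1], 2)], [([1], 3), ([2], -1)]]

def Spec_find_best_diff (all_diffs : List (List (List Int × Int))) (out : Int) : Prop := out = find_best_diff_alt all_diffs
instance (all_diffs : List (List (List Int × Int))) (out : Int) : Decidable (Spec_find_best_diff all_diffs out) := by unfold Spec_find_best_diff; infer_instance

-- ===== CLAIM (what is proved, stated in full; the proofs are below) =====
def Claim_equal_find_best_diff : Prop := ∀ (all_diffs : List (List (List Int × Int))), Dom_find_best_diff all_diffs → Pre_find_best_diff all_diffs → Spec_find_best_diff all_diffs (find_best_diff all_diffs)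

-- ===== LEMMAS AND PROOFS =====

-- the total of key k over all dicts (0 where absent); both programs compute a max of these
def pvS (all : List (List (List Int × Int))) (k : List Int) : Int :=
  (all.map (fun d => (PySem.Dict.mk d).getD k 0)).sum

theorem pv_sum_filter (all : List (List (List Int × Int))) (k : List Int) :
    ((all.filter (fun diff => (PySem.Dict.mk diff).contains k)).map
        (fun diff => (PySem.Dict.mk diff).getD k 0)).sum = pvS all k := by
  induction all with
  | nil => rfl
  | cons d rest ih =>
    simp only [pvS, List.map_cons, List.sum_cons]
    rw [List.filter_cons]
    by_cases h : (PySem.Dict.mk d).contains k = true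
    · rw [if_pos h, List.map_cons, List.sum_cons, ih, pvS]
    · simp only [Bool.not_eq_true] at h
      rw [h, if_neg (by simp), ih, pvS, PySem.Dict.getD_of_not_contains _ _ h]
      omega

theorem pv_memA (all : List (List (List Int × Int))) (s : PySem.Set (List Int)) (k : List Int) :
    k ∈ all.foldl
        (fun s d => PySem.Set.union s (PySem.Set.ofList (PySem.Dict.mk d).keys)) s ↔
      k ∈ s ∨ ∃ d ∈ all, k ∈ d.map Prod.fst := by
  induction all generalizing s with
  | nil => simp
  | cons d rest ih =>
    rw [List.foldl_cons, ih]
    simp only [PySem.Set.union, PySem.Set.mem_update, PySem.Set.mem_ofList,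
      PySem.Dict.keys_mk, List.mem_cons]
    constructor
    · rintro ((h | h) | ⟨d', hd', hk⟩)
      · exact Or.inl h
      · exact Or.inr ⟨d, Or.inl rfl, h⟩
      · exact Or.inr ⟨d', Or.inr hd', hk⟩
    · rintro (h | ⟨d', hd' | hd', hk⟩)
      · exact Or.inl (Or.inl h)
      · subst hd'; exact Or.inl (Or.inr hk)
      · exact Or.inr ⟨d', hd', hk⟩

theorem pv_nodupA (all : List (List (List Int × Int))) (s : PySem.Set (List Int))
    (hs : s.Nodup) :
    (all.foldl
        (fun s d => PySem.Set.union s (PySem.Set.ofList (PySem.Dict.mk d).keys)) s).Nodup := by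
  induction all generalizing s with
  | nil => exact hs
  | cons d rest ih => exact ih _ (PySem.Set.nodup_update _ _ hs)

theorem pv_memB (all : List (List (List Int × Int))) (t : PySem.Dict (List Int) Int)
    (k : List Int) :
    k ∈ (all.foldl
        (fun t d => d.foldl (fun t kv => t.insert kv.1 (t.getD kv.1 0 + kv.2)) t) t).keys ↔
      k ∈ t.keys ∨ ∃ d ∈ all, k ∈ d.map Prod.fst := by
  induction all generalizing t with
  | nil => simp
  | cons d rest ih =>
    rw [List.foldl_cons, ih]
    simp only [PySem.Dict.keys_foldl_insert_key d Prod.fst (fun t kv => t.getD kv.1 0 + kv.2) t,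
      PySem.Set.mem_update, List.mem_cons]
    constructor
    · rintro ((h | h) | ⟨d', hd', hk⟩)
      · exact Or.inl h
      · exact Or.inr ⟨d, Or.inl rfl, h⟩
      · exact Or.inr ⟨d', Or.inr hd', hk⟩
    · rintro (h | ⟨d', hd' | hd', hk⟩)
      · exact Or.inl (Or.inl h)
      · subst hd'; exact Or.inl (Or.inr hk)
      · exact Or.inr ⟨d', hd', hk⟩

theorem pv_nodupB (all : List (List (List Int × Int))) (t : PySem.Dict (List Int) Int)
    (ht : t.keys.Nodup) :
    (all.foldl
        (fun t d => d.foldl (fun t kv => t.insert kv.1 (t.getD kv.1 0 + kv.2)) t) t).keys.Nodup := by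
  induction all generalizing t with
  | nil => exact ht
  | cons d rest ih =>
    exact ih _ (PySem.Dict.nodup_keys_foldl_insert_key d Prod.fst _ t ht)

theorem pv_getD_inner (d : List (List Int × Int)) (t : PySem.Dict (List Int) Int)
    (k : List Int) (hnd : (d.map Prod.fst).Nodup) :
    (d.foldl (fun t kv => t.insert kv.1 (t.getD kv.1 0 + kv.2)) t).getD k 0 =
      t.getD k 0 + (PySem.Dict.mk d).getD k 0 := by
  induction d generalizing t with
  | nil =>
    simp [PySem.Dict.getD_eq_get?_getD, PySem.Dict.get?]
  | cons p rest ih =>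
    obtain ⟨a, v⟩ := p
    simp only [List.map_cons, List.nodup_cons] at hnd
    rw [List.foldl_cons, ih _ hnd.2, PySem.Dict.getD_insert,
      PySem.Dict.getD_eq_get?_getD (PySem.Dict.mk ((a, v) :: rest)), PySem.Dict.get?_mk_cons]
    by_cases hk : k = a
    · subst hk
      have hnc : (PySem.Dict.mk rest).contains k = false := by
        simp only [PySem.Dict.contains_mk, List.any_eq_false]
        intro p hp hb
        exact hnd.1 (beq_iff_eq.mp hb ▸ List.mem_map_of_mem hp)
      rw [if_pos rfl, PySem.Dict.getD_of_not_contains _ _ hnc, if_pos (beq_self_eq_true k)]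
      simp
    · have hba : (a == k) = false := beq_eq_false_iff_ne.mpr (Ne.symm hk)
      rw [if_neg hk, hba, if_neg (by simp), ← PySem.Dict.getD_eq_get?_getD]

theorem pv_getD_totals (all : List (List (List Int × Int))) (t : PySem.Dict (List Int) Int)
    (k : List Int) (hpre : ∀ d ∈ all, (d.map Prod.fst).Nodup) :
    (all.foldl
        (fun t d => d.foldl (fun t kv => t.insert kv.1 (t.getD kv.1 0 + kv.2)) t) t).getD k 0 =
      t.getD k 0 + pvS all k := by
  induction all generalizing t with
  | nil => simp [pvS]
  | cons d rest ih =>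
    simp only [List.foldl_cons,
      ih _ (fun d' hd' => hpre d' (List.mem_cons_of_mem _ hd')),
      pv_getD_inner d t k (hpre d (List.mem_cons_self)), pvS, List.map_cons, List.sum_cons]
    omega

theorem pv_max_foldl_eq (K : List (List Int)) (g : List Int → Int) (b : Int) :
    (K.map g).foldl (fun best s => if s > best then s else best) b =
      K.foldl (fun best k => max (g k) best) b := by
  rw [List.foldl_map]
  induction K generalizing b with
  | nil => rfl
  | cons k rest ih =>
    simp only [List.foldl_cons, ih]
    congr 1
    split_ifs <;> omega

-- ===== VERDICT (by name: the statement is the Claim_ definition above) =====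
theorem find_best_diff_spec : Claim_equal_find_best_diff := by
  intro all _ hpre
  unfold Spec_find_best_diff find_best_diff find_best_diff_alt
  set F := fun (t : PySem.Dict (List Int) Int) (d : List (List Int × Int)) =>
    d.foldl (fun t kv => t.insert kv.1 (t.getD kv.1 0 + kv.2)) t with hF
  set totals := all.foldl F PySem.Dict.empty with htot
  set KA := all.foldl
    (fun s d => PySem.Set.union s (PySem.Set.ofList (PySem.Dict.mk d).keys))
    PySem.Set.empty with hKA
  -- A's running max, with the inner generator-sum rewritten to the per-key total
  have hA : KA.foldl
      (fun best_sum d =>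
        max (((all.filter (fun diff => (PySem.Dict.mk diff).contains d)).map
                (fun diff => (PySem.Dict.mk diff).getD d 0)).sum) best_sum) 0 =
      KA.foldl (fun best k => max (pvS all k) best) 0 := by
    have : (fun (best_sum : Int) (d : List Int) =>
        max (((all.filter (fun diff => (PySem.Dict.mk diff).contains d)).map
                (fun diff => (PySem.Dict.mk diff).getD d 0)).sum) best_sum) =
        fun best k => max (pvS all k) best := by
      funext b k; rw [pv_sum_filter]
    rw [this]
  -- B's running max over the totals' values is the same fold over the totals' keys
  have hnodup : totals.keys.Nodup := pv_nodupB all _ (by simp)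
  have hB : totals.values.foldl (fun best s => if s > best then s else best) 0 =
      totals.keys.foldl (fun best k => max (pvS all k) best) 0 := by
    rw [PySem.Dict.values_eq_map_keys totals hnodup 0, pv_max_foldl_eq]
    apply PySem.List.foldl_congr_mem
    intro acc k _
    rw [htot, hF, pv_getD_totals all _ k hpre, PySem.Dict.getD_empty]
    simp
  have hperm : KA.Perm totals.keys := by
    apply (List.perm_ext_iff_of_nodup (pv_nodupA all PySem.Set.empty List.nodup_nil) hnodup).mpr
    intro k
    rw [pv_memA, htot, hF, pv_memB]
    simp [PySem.Set.empty, PySem.Dict.keys_empty]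
  simp only [hA, hB]
  exact hperm.foldl_eq' (fun x _ y _ z => by rw [max_left_comm]) 0
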